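-- pv_equiv track=rewrite | github.com/jintak0401/Problem_Solving | 3111.py | solve
-- ===== SOURCE A (Python) =====
-- def solve(string, compare):
--
--     r_compare = compare[::-1]
--     left_str, right_str = [], []
--     left, right = 0, len(string) - 1
--     left_turn = True
--     while left <= right:
--         if left_turn:
--             left_str.append(string[left])
--             left += 1
--             if left_str[-len(compare):] == compare:
--                 left_str[-len(compare):] = []
--                 left_turn = False
--         else:
--             right_str.append(string[right])
--             right -= 1
--             if right_str[-len(compare):] == r_compare:
--                 right_str[-len(compare):] = []
--                 left_turn = True
--
--     ans = []
--     if len(left_str) > 0: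
--         ans += left_str
--     if len(right_str) > 0:
--         ans += right_str[::-1]
--
--     ans = ''.join(ans)
--     compare = ''.join(compare)
--     idx = ans.find(compare)
--     while idx != -1:
--         ans = ans[:idx] + ans[idx + len(compare):]
--         idx = ans.find(compare)
--
--     return ans
-- ===== SOURCE B (Python) =====
-- def solve(string, compare):
--     r_compare = compare[::-1]
--     m = len(compare)
--     lst, rst = [], []
--     left, right = 0, len(string) - 1
--     # phase 1: alternate between the two ends; each inner loop consumes
--     # until it erases one occurrence (hit) or the pointers cross.
--     while True:
--         hit = False
--         while left <= right:
--             lst.append(string[left])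
--             left += 1
--             if lst[-m:] == compare:
--                 del lst[-m:]
--                 hit = True
--                 break
--         if not hit:
--             break
--         hit = False
--         while left <= right:
--             rst.append(string[right])
--             right -= 1
--             if rst[-m:] == r_compare:
--                 del rst[-m:]
--                 hit = True
--                 break
--         if not hit:
--             break
--     # phase 2: one stack pass over the leftover characters removes the
--     # remaining occurrences (same result as repeated leftmost deletion).
--     pat = list(''.join(compare))
--     mp = len(pat)
--     out = []
--     for c in lst:
--         out.append(c)
--         if out[-mp:] == pat:
--             del out[-mp:]
--     while rst:
--         out.append(rst.pop())
--         if out[-mp:] == pat: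
--             del out[-mp:]
--     return ''.join(out)
-- ===== Notes on version B (the rewrite author's own statement) =====
-- stated objective: alternative
-- what changed: Phase 1's single flag-switched while loop becomes an outer round loop with two inner consume-until-one-erasure loops, and phase 2's repeated ans.find(pattern)+slice rescans over the whole string are replaced by a single stack pass that erases the pattern whenever it appears on top of the stack.
import Mathlib
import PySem

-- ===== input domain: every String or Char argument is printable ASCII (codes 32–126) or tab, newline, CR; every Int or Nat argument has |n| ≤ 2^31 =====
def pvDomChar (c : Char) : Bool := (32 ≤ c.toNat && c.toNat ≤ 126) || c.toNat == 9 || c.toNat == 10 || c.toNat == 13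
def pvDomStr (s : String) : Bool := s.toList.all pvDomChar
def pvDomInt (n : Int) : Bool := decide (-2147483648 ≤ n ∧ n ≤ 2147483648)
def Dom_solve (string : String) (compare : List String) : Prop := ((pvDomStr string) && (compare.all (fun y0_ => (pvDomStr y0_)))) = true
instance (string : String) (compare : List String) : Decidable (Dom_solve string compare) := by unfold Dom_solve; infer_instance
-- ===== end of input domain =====

-- B restructures both phases: phase 1 becomes an outer round loop with two inner
-- "consume until one erasure" loops, and phase 2 replaces A's repeated find+slice
-- rescans by a single stack pass; same return value (objective: alternative).

-- ===== PORT A =====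
-- A's while loop: state (left, right, left_turn, left_str, right_str), one step per
-- call; the loop runs at most len(string) times (each step consumes one character of
-- string[left..right]), so fuel = len(string) is exact and never runs out.
def solveLoop (cs : List Char) (compare rcompare : List String) :
    Nat → Int → Int → Bool → List String → List String → List String × List String
  | 0, _, _, _, lstr, rstr => (lstr, rstr)
  | fuel + 1, left, right, leftTurn, lstr, rstr =>
    if left ≤ right then
      if leftTurn then
        -- left_str.append(string[left]); left += 1; suffix test; del left_str[-len(compare):]
        -- (string[left] is always in range here: 0 ≤ left ≤ right < len(string))
        if PySem.List.slice (lstr ++ [String.ofList [PySem.List.pyGetD cs left ' ']])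
            (some (-(compare.length : Int))) none = compare then
          solveLoop cs compare rcompare fuel (left + 1) right false
            (PySem.List.slice (lstr ++ [String.ofList [PySem.List.pyGetD cs left ' ']])
              none (some (-(compare.length : Int)))) rstr
        else
          solveLoop cs compare rcompare fuel (left + 1) right true
            (lstr ++ [String.ofList [PySem.List.pyGetD cs left ' ']]) rstr
      else
        -- right_str.append(string[right]); right -= 1; suffix test against r_compare
        if PySem.List.slice (rstr ++ [String.ofList [PySem.List.pyGetD cs right ' ']])
            (some (-(compare.length : Int))) none = rcompare then
          solveLoop cs compare rcompare fuel left (right - 1) true lstr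
            (PySem.List.slice (rstr ++ [String.ofList [PySem.List.pyGetD cs right ' ']])
              none (some (-(compare.length : Int))))
        else
          solveLoop cs compare rcompare fuel left (right - 1) false lstr
            (rstr ++ [String.ofList [PySem.List.pyGetD cs right ' ']])
    else (lstr, rstr)

-- A's second loop: idx = ans.find(pat); while idx != -1: ans = ans[:idx] + ans[idx+len:].
-- Each removal shortens ans by len(pat) ≥ 1 (Pre_ gives pat ≠ ''), so fuel = |ans| + 1
-- suffices; on the excluded pat = '' inputs Python never terminates.
def findStrip (pat : List Char) : Nat → List Char → List Char
  | 0, ans => ans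
  | fuel + 1, ans =>
    if PySem.Chars.find ans pat = -1 then ans
    else
      findStrip pat fuel
        (PySem.List.slice ans none (some (PySem.Chars.find ans pat)) ++
          PySem.List.slice ans (some (PySem.Chars.find ans pat + (pat.length : Int))) none)

def solve (string : String) (compare : List String) : String :=
  let rcompare := compare.reverse      -- compare[::-1]  (PySem.List.slice?_none_none_neg_one)
  let cs := string.toList
  let p := solveLoop cs compare rcompare cs.length 0 (PySem.Str.len string - 1) true [] []
  -- ans = [] ; if len(left_str) > 0: ans += left_str ; if len(right_str) > 0: ans += right_str[::-1]
  let ansL := (if 0 < p.1.length then p.1 else []) ++ (if 0 < p.2.length then p.2.reverse else [])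
  let ans := PySem.Chars.join [] (ansL.map String.toList)       -- ''.join(ans)
  let pat := PySem.Chars.join [] (compare.map String.toList)    -- ''.join(compare)
  String.ofList (findStrip pat (ans.length + 1) ans)

-- ===== PORT B =====
-- Source B inner left loop: consume from the left until one erasure (hit) or the pointers
-- cross; like A's loop it runs at most len(string) times, fuel never runs out.
def takeLeft (cs : List Char) (compare : List String) :
    Nat → Int → Int → List String → Int × List String × Bool
  | 0, left, _, lst => (left, lst, false)
  | fuel + 1, left, right, lst =>
    if left ≤ right then
      if PySem.List.slice (lst ++ [String.ofList [PySem.List.pyGetD cs left ' ']])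
          (some (-(compare.length : Int))) none = compare then
        (left + 1,
          PySem.List.slice (lst ++ [String.ofList [PySem.List.pyGetD cs left ' ']])
            none (some (-(compare.length : Int))), true)
      else takeLeft cs compare fuel (left + 1) right
        (lst ++ [String.ofList [PySem.List.pyGetD cs left ' ']])
    else (left, lst, false)

-- Source B inner right loop (against the reversed pattern).
def takeRight (cs : List Char) (rcompare : List String) :
    Nat → Int → Int → List String → Int × List String × Bool
  | 0, _, right, rst => (right, rst, false)
  | fuel + 1, left, right, rst =>
    if left ≤ right then
      if PySem.List.slice (rst ++ [String.ofList [PySem.List.pyGetD cs right ' ']])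
          (some (-(rcompare.length : Int))) none = rcompare then
        (right - 1,
          PySem.List.slice (rst ++ [String.ofList [PySem.List.pyGetD cs right ' ']])
            none (some (-(rcompare.length : Int))), true)
      else takeRight cs rcompare fuel left (right - 1)
        (rst ++ [String.ofList [PySem.List.pyGetD cs right ' ']])
    else (right, rst, false)

-- Source B outer 'while True' round loop; every completed round erases one occurrence on
-- each side, consuming at least two characters, so fuel = len(string) never runs out.
def altLoop (cs : List Char) (compare rcompare : List String) :
    Nat → Int → Int → List String → List String → List String × List String
  | 0, _, _, lst, rst => (lst, rst)
  | fuel + 1, left, right, lst, rst =>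
    if (takeLeft cs compare (fuel + 1) left right lst).2.2 then
      if (takeRight cs rcompare (fuel + 1) (takeLeft cs compare (fuel + 1) left right lst).1
          right rst).2.2 then
        altLoop cs compare rcompare fuel
          (takeLeft cs compare (fuel + 1) left right lst).1
          (takeRight cs rcompare (fuel + 1) (takeLeft cs compare (fuel + 1) left right lst).1
            right rst).1
          (takeLeft cs compare (fuel + 1) left right lst).2.1
          (takeRight cs rcompare (fuel + 1) (takeLeft cs compare (fuel + 1) left right lst).1
            right rst).2.1
      else ((takeLeft cs compare (fuel + 1) left right lst).2.1,
        (takeRight cs rcompare (fuel + 1) (takeLeft cs compare (fuel + 1) left right lst).1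
          right rst).2.1)
    else ((takeLeft cs compare (fuel + 1) left right lst).2.1, rst)

-- Source B phase-2 step: push one character, erase the pattern when it appears on top.
def push (pat : List Char) (out : List Char) (c : Char) : List Char :=
  let out' := out ++ [c]
  if PySem.List.slice out' (some (-(pat.length : Int))) none = pat then
    PySem.List.slice out' none (some (-(pat.length : Int)))
  else out'

-- lst / rst hold the one-character strings string[i]; Source B's pat = list(''.join(compare))
-- is their character alphabet, so the two phase-2 loops are ported over List Char
-- (the characters of lst, then — via rst.pop() — the characters of rst reversed).
def solve_alt (string : String) (compare : List String) : String :=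
  let rcompare := compare.reverse
  let cs := string.toList
  let p := altLoop cs compare rcompare cs.length 0 (PySem.Str.len string - 1) [] []
  let pat := PySem.Chars.join [] (compare.map String.toList)
  let out1 := (PySem.Chars.join [] (p.1.map String.toList)).foldl (push pat) []
  let out2 := (PySem.Chars.join [] (p.2.reverse.map String.toList)).foldl (push pat) out1
  String.ofList out2

-- ===== PRECONDITION & SPEC =====
-- Pre_ excludes exactly the inputs with ''.join(compare) == '', on which A's final
-- find('')-removal loop never terminates (A returns no value there; B would return).
def Pre_solve (string : String) (compare : List String) : Prop :=
  PySem.Chars.join [] (compare.map String.toList) ≠ []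
instance (string : String) (compare : List String) : Decidable (Pre_solve string compare) := by
  unfold Pre_solve; infer_instance

def pvWitness_solve : String × List String := ("aba", ["a", "b"])

def Spec_solve (string : String) (compare : List String) (out : String) : Prop :=
  out = solve_alt string compare
instance (string : String) (compare : List String) (out : String) :
    Decidable (Spec_solve string compare out) := by unfold Spec_solve; infer_instance

-- ===== CLAIM (what is proved, stated in full; the proofs are below) =====
def Claim_equal_solve : Prop := ∀ (string : String) (compare : List String),
  Dom_solve string compare → Pre_solve string compare →
    Spec_solve string compare (solve string compare)

-- ===== LEMMAS AND PROOFS =====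

-- Any two sufficient fuels agree (the loops stop on left > right, not on fuel).
theorem solveLoop_congr (cs : List Char) (compare rcompare : List String) :
    ∀ (f1 f2 : Nat) (left right : Int) (turn : Bool) (lstr rstr : List String),
      (right + 1 - left).toNat ≤ f1 → (right + 1 - left).toNat ≤ f2 →
      solveLoop cs compare rcompare f1 left right turn lstr rstr =
        solveLoop cs compare rcompare f2 left right turn lstr rstr := by
  intro f1
  induction f1 with
  | zero =>
    intro f2 left right turn lstr rstr h1 h2
    cases f2 with
    | zero => rfl
    | succ f2 => rw [solveLoop, solveLoop, if_neg (by omega)]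
  | succ f1 ih =>
    intro f2 left right turn lstr rstr h1 h2
    cases f2 with
    | zero => rw [solveLoop, solveLoop, if_neg (by omega)]
    | succ f2 =>
      rw [solveLoop, solveLoop]
      by_cases hlr : left ≤ right
      · rw [if_pos hlr, if_pos hlr]
        cases turn <;> (simp only [Bool.false_eq_true, if_false, if_true]) <;> split <;>
          exact ih f2 _ _ _ _ _ (by omega) (by omega)
      · rw [if_neg hlr, if_neg hlr]

theorem takeLeft_le (cs : List Char) (compare : List String) :
    ∀ (fuel : Nat) (left right : Int) (lst : List String),
      left ≤ (takeLeft cs compare fuel left right lst).1 := by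
  intro fuel
  induction fuel with
  | zero => intro left right lst; simp [takeLeft]
  | succ f ih =>
    intro left right lst
    rw [takeLeft]
    split
    · split
      · simp
      · have := ih (left + 1) right (lst ++ [String.ofList [PySem.List.pyGetD cs left ' ']])
        omega
    · simp

theorem takeRight_ge (cs : List Char) (rcompare : List String) :
    ∀ (fuel : Nat) (left right : Int) (rst : List String),
      (takeRight cs rcompare fuel left right rst).1 ≤ right := by
  intro fuel
  induction fuel with
  | zero => intro left right rst; simp [takeRight]
  | succ f ih =>
    intro left right rst
    rw [takeRight]
    split
    · split
      · simp
      · have := ih left (right - 1) (rst ++ [String.ofList [PySem.List.pyGetD cs right ' ']])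
        omega
    · simp

-- takeLeft / takeRight make strict progress when they erase (used for the fuel bound)
theorem takeLeft_hit (cs : List Char) (compare : List String) :
    ∀ (fuel : Nat) (left right : Int) (lst : List String),
      (takeLeft cs compare fuel left right lst).2.2 = true →
      left < (takeLeft cs compare fuel left right lst).1 ∧ left ≤ right := by
  intro fuel
  induction fuel with
  | zero => intro left right lst h; simp [takeLeft] at h
  | succ f ih =>
    intro left right lst h
    rw [takeLeft] at h ⊢
    by_cases hlr : left ≤ right
    · rw [if_pos hlr] at h ⊢
      by_cases hc : PySem.List.slice (lst ++ [String.ofList [PySem.List.pyGetD cs left ' ']])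
          (some (-(compare.length : Int))) none = compare
      · rw [if_pos hc]
        exact ⟨by simp, hlr⟩
      · rw [if_neg hc] at h ⊢
        have := ih (left + 1) right (lst ++ [String.ofList [PySem.List.pyGetD cs left ' ']]) h
        exact ⟨by omega, hlr⟩
    · rw [if_neg hlr] at h
      simp at h

theorem takeRight_hit (cs : List Char) (rcompare : List String) :
    ∀ (fuel : Nat) (left right : Int) (rst : List String),
      (takeRight cs rcompare fuel left right rst).2.2 = true →
      (takeRight cs rcompare fuel left right rst).1 < right ∧ left ≤ right := by
  intro fuel
  induction fuel with
  | zero => intro left right rst h; simp [takeRight] at h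
  | succ f ih =>
    intro left right rst h
    rw [takeRight] at h ⊢
    by_cases hlr : left ≤ right
    · rw [if_pos hlr] at h ⊢
      by_cases hc : PySem.List.slice (rst ++ [String.ofList [PySem.List.pyGetD cs right ' ']])
          (some (-(rcompare.length : Int))) none = rcompare
      · rw [if_pos hc]
        exact ⟨by simp, hlr⟩
      · rw [if_neg hc] at h ⊢
        have := ih left (right - 1) (rst ++ [String.ofList [PySem.List.pyGetD cs right ' ']]) h
        exact ⟨by omega, hlr⟩
    · rw [if_neg hlr] at h
      simp at h

-- Phase 1: A's flagged loop in the 'left' state is one takeLeft burst.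
theorem loop_true_eq (cs : List Char) (compare rcompare : List String) :
    ∀ (fuel : Nat) (left right : Int) (lst rst : List String),
      (right + 1 - left).toNat ≤ fuel →
      solveLoop cs compare rcompare fuel left right true lst rst =
        (if (takeLeft cs compare fuel left right lst).2.2 then
          solveLoop cs compare rcompare fuel (takeLeft cs compare fuel left right lst).1 right false
            (takeLeft cs compare fuel left right lst).2.1 rst
        else ((takeLeft cs compare fuel left right lst).2.1, rst)) := by
  intro fuel
  induction fuel with
  | zero => intro left right lst rst h; simp [solveLoop, takeLeft]
  | succ f ih =>
    intro left right lst rst h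
    by_cases hlr : left ≤ right
    · rw [solveLoop, if_pos hlr, if_pos rfl]
      conv_rhs => rw [takeLeft, if_pos hlr]
      split
      · simp only [↓reduceIte]
        exact solveLoop_congr cs compare rcompare f (f + 1) _ _ _ _ _ (by omega) (by omega)
      · rw [ih (left + 1) right (lst ++ [String.ofList [PySem.List.pyGetD cs left ' ']]) rst (by omega)]
        split
        · have hle := takeLeft_le cs compare f (left + 1) right
            (lst ++ [String.ofList [PySem.List.pyGetD cs left ' ']])
          exact solveLoop_congr cs compare rcompare f (f + 1) _ _ _ _ _ (by omega) (by omega)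
        · rfl
    · rw [solveLoop, if_neg hlr]
      conv_rhs => rw [takeLeft, if_neg hlr]
      simp

theorem loop_false_eq (cs : List Char) (compare rcompare : List String)
    (hlen : rcompare.length = compare.length) :
    ∀ (fuel : Nat) (left right : Int) (lst rst : List String),
      (right + 1 - left).toNat ≤ fuel →
      solveLoop cs compare rcompare fuel left right false lst rst =
        (if (takeRight cs rcompare fuel left right rst).2.2 then
          solveLoop cs compare rcompare fuel left (takeRight cs rcompare fuel left right rst).1 true
            lst (takeRight cs rcompare fuel left right rst).2.1
        else (lst, (takeRight cs rcompare fuel left right rst).2.1)) := by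
  intro fuel
  induction fuel with
  | zero => intro left right lst rst h; simp [solveLoop, takeRight]
  | succ f ih =>
    intro left right lst rst h
    by_cases hlr : left ≤ right
    · rw [solveLoop, if_pos hlr, if_neg (by simp)]
      conv_rhs => rw [takeRight, if_pos hlr]
      rw [hlen]
      split
      · simp only [↓reduceIte]
        exact solveLoop_congr cs compare rcompare f (f + 1) _ _ _ _ _ (by omega) (by omega)
      · rw [ih left (right - 1) lst (rst ++ [String.ofList [PySem.List.pyGetD cs right ' ']]) (by omega)]
        split
        · have hge := takeRight_ge cs rcompare f left (right - 1)
            (rst ++ [String.ofList [PySem.List.pyGetD cs right ' ']])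
          exact solveLoop_congr cs compare rcompare f (f + 1) _ _ _ _ _ (by omega) (by omega)
        · rfl
    · rw [solveLoop, if_neg hlr]
      conv_rhs => rw [takeRight, if_neg hlr]
      simp

theorem loop_eq_alt (cs : List Char) (compare rcompare : List String)
    (hlen : rcompare.length = compare.length) :
    ∀ (fuel : Nat) (left right : Int) (lst rst : List String),
      (right + 1 - left).toNat ≤ fuel →
      solveLoop cs compare rcompare fuel left right true lst rst =
        altLoop cs compare rcompare fuel left right lst rst := by
  intro fuel
  induction fuel with
  | zero => intro left right lst rst h; rfl
  | succ f ih =>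
    intro left right lst rst h
    rw [loop_true_eq cs compare rcompare (f + 1) left right lst rst h, altLoop]
    by_cases h1 : (takeLeft cs compare (f + 1) left right lst).2.2
    · rw [if_pos h1, if_pos h1,
        loop_false_eq cs compare rcompare hlen (f + 1) _ right _ rst
          (by have := takeLeft_le cs compare (f + 1) left right lst; omega)]
      by_cases h2 : (takeRight cs rcompare (f + 1) (takeLeft cs compare (f + 1) left right lst).1
          right rst).2.2
      · rw [if_pos h2, if_pos h2]
        have hL := takeLeft_hit cs compare (f + 1) left right lst h1
        have hR := takeRight_hit cs rcompare (f + 1) (takeLeft cs compare (f + 1) left right lst).1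
          right rst h2
        rw [solveLoop_congr cs compare rcompare (f + 1) f _ _ _ _ _ (by omega) (by omega)]
        exact ih _ _ _ _ (by omega)
      · rw [if_neg h2, if_neg h2]
    · rw [if_neg h1, if_neg h1]

-- the top-of-stack test is exactly "pat is a suffix"
theorem slice_suffix_iff {α : Type} [DecidableEq α] (pat xs : List α) (hp : pat ≠ []) :
    (PySem.List.slice xs (some (-(pat.length : Int))) none = pat) ↔ pat <:+ xs := by
  have hm : 0 < pat.length := List.length_pos_iff.mpr hp
  rw [PySem.List.slice_from_neg_natCast (hk := hm), List.suffix_iff_eq_drop]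
  exact eq_comm

-- an occurrence that starts before index k and ends by index k lies inside the take
theorem infix_take_of_prefix_drop {α : Type} (pat l : List α) (i k : Nat)
    (h : pat <+: l.drop i) (hk : i + pat.length ≤ k) : pat <:+: l.take k := by
  have h1 : pat <+: (l.take k).drop i := by
    rw [List.drop_take]
    exact List.prefix_take_iff.mpr ⟨h, by omega⟩
  exact h1.isInfix.trans (List.drop_suffix _ _).isInfix

theorem infix_snoc {α : Type} (pat xs : List α) (c : α) (h : pat <:+: xs ++ [c]) :
    pat <:+: xs ∨ pat <:+ xs ++ [c] := by
  obtain ⟨s, t, hst⟩ := h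
  rcases List.eq_nil_or_concat t with rfl | ⟨t', a, rfl⟩
  · right; exact ⟨s, by simpa using hst⟩
  · left
    have h2 : (s ++ pat ++ t') ++ [a] = xs ++ [c] := by simpa [List.append_assoc] using hst
    obtain ⟨h3, rfl⟩ := List.append_singleton_inj.mp h2
    exact ⟨s, t', h3⟩

-- Phase 2 core: repeated leftmost removal equals the stack pass (pattern-free stack).
theorem strip_eq_fold (pat : List Char) (hp : pat ≠ []) :
    ∀ (rest st : List Char) (fuel : Nat), ¬ pat <:+: st →
      st.length + rest.length + 1 ≤ fuel →
      findStrip pat fuel (st ++ rest) = rest.foldl (push pat) st := by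
  have hm : 0 < pat.length := List.length_pos_iff.mpr hp
  intro rest
  induction rest with
  | nil =>
    intro st fuel hst hfuel
    obtain ⟨f, rfl⟩ : ∃ f, fuel = f + 1 := ⟨fuel - 1, by omega⟩
    simp only [List.append_nil, List.foldl_nil, findStrip]
    rw [if_pos ((PySem.Chars.find_eq_neg_one_iff _ _).mpr hst)]
  | cons c rest ih =>
    intro st fuel hst hfuel
    have hsnoc : st ++ c :: rest = (st ++ [c]) ++ rest := by simp
    rw [hsnoc, List.foldl_cons]
    by_cases hs : pat <:+ st ++ [c]
    · -- the pushed character completes an occurrence: both sides erase it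
      have hmle : pat.length ≤ st.length + 1 := by simpa using hs.length_le
      set st2 := (st ++ [c]).take (st.length + 1 - pat.length) with hst2
      have hlen2 : st2.length = st.length + 1 - pat.length := by
        simp [hst2]
      have hdec : st2 ++ pat = st ++ [c] := by
        have hdrop : pat = (st ++ [c]).drop (st.length + 1 - pat.length) := by
          simpa using List.suffix_iff_eq_drop.mp hs
        rw [hst2]
        conv_rhs => rw [← List.take_append_drop (st.length + 1 - pat.length) (st ++ [c])]
        rw [← hdrop]
      have hpush : push pat st c = st2 := by
        simp only [push]
        rw [if_pos ((slice_suffix_iff pat _ hp).mpr hs)]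
        rw [PySem.List.slice_to_neg_natCast (hk := hm), hst2]
        simp
      have hst2pre : st2 <+: st := by
        rw [hst2, List.take_append_of_le_length (by omega)]
        exact List.take_prefix _ _
      have hst2inf : ¬ pat <:+: st2 := fun hinf => hst (hinf.trans hst2pre.isInfix)
      have hall : (st ++ [c]) ++ rest = st2 ++ (pat ++ rest) := by
        rw [← hdec, List.append_assoc]
      have hocc : pat <+: ((st ++ [c]) ++ rest).drop st2.length := by
        rw [hall, List.drop_left]
        exact List.prefix_append _ _
      have hnone : ∀ i < st2.length, ¬ pat <+: ((st ++ [c]) ++ rest).drop i := by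
        intro i hi hpre
        apply hst
        have h1 : pat <:+: ((st ++ [c]) ++ rest).take st.length :=
          infix_take_of_prefix_drop pat _ i st.length hpre (by omega)
        rwa [List.append_assoc, List.take_left] at h1
      have hinfall : pat <:+: (st ++ [c]) ++ rest :=
        ⟨st2, rest, by rw [hdec]⟩
      have hfnn : 0 ≤ PySem.Chars.find ((st ++ [c]) ++ rest) pat :=
        (PySem.Chars.find_nonneg_iff _ _).mpr hinfall
      obtain ⟨hfpre, hfmin⟩ := PySem.Chars.find_spec (s := (st ++ [c]) ++ rest) (sub := pat) hfnn
      have htn : (PySem.Chars.find ((st ++ [c]) ++ rest) pat).toNat = st2.length := by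
        by_contra hne
        rcases Nat.lt_or_ge (PySem.Chars.find ((st ++ [c]) ++ rest) pat).toNat st2.length with hlt | hge
        · exact hnone _ hlt hfpre
        · exact hfmin st2.length (by omega) hocc
      have hfind : PySem.Chars.find ((st ++ [c]) ++ rest) pat = (st2.length : Int) := by
        rw [← htn]
        exact (Int.toNat_of_nonneg hfnn).symm
      obtain ⟨f, rfl⟩ : ∃ f, fuel = f + 1 := ⟨fuel - 1, by omega⟩
      simp only [findStrip]
      rw [if_neg (by rw [hfind]; omega)]
      rw [hfind]
      have hcast : ((st2.length : Int) + (pat.length : Int)) = ((st2.length + pat.length : Nat) : Int) := by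
        push_cast; ring
      rw [PySem.List.slice_to_natCast, hcast, PySem.List.slice_from_natCast]
      have htake : ((st ++ [c]) ++ rest).take st2.length = st2 := by
        rw [hall, List.take_left]
      have hdrop2 : ((st ++ [c]) ++ rest).drop (st2.length + pat.length) = rest := by
        rw [hall, ← List.append_assoc]
        have hl : st2.length + pat.length = (st2 ++ pat).length := by simp
        rw [hl, List.drop_left]
      rw [htake, hdrop2, hpush]
      exact ih st2 f hst2inf (by simp only [List.length_cons] at hfuel; omega)
    · -- no occurrence on top: both sides keep the character
      have hpush : push pat st c = st ++ [c] := by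
        simp only [push]
        rw [if_neg (fun hcond => hs ((slice_suffix_iff pat _ hp).mp hcond))]
      rw [hpush]
      have hst' : ¬ pat <:+: st ++ [c] := by
        intro hinf
        rcases infix_snoc pat st c hinf with h1 | h1
        exacts [hst h1, hs h1]
      exact ih (st ++ [c]) fuel hst' (by simp at hfuel ⊢; omega)

theorem join_nil_flat (parts : List (List Char)) :
    PySem.Chars.join [] parts = parts.flatten := by
  induction parts with
  | nil => simp [PySem.Chars.join, List.intercalate]
  | cons x rest ih =>
    cases rest with
    | nil => simp [PySem.Chars.join, List.intercalate]
    | cons y t =>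
      simp only [PySem.Chars.join, List.intercalate] at *
      rw [show List.intersperse ([] : List Char) (x :: y :: t) =
            x :: [] :: List.intersperse [] (y :: t) from rfl]
      simp_all

-- ===== VERDICT (by name: the statement is the Claim_ definition above) =====
theorem solve_spec : Claim_equal_solve := by
  intro string compare _hdom hpre
  show solve string compare = solve_alt string compare
  simp only [solve, solve_alt]
  have hlenstr : PySem.Str.len string = (string.toList.length : Int) := by
    simp [pysem]
  rw [loop_eq_alt _ _ _ List.length_reverse string.toList.length _ _ _ _ (by omega)]
  set p := altLoop string.toList compare compare.reverse string.toList.length 0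
    (PySem.Str.len string - 1) [] [] with hp
  set pat := PySem.Chars.join [] (List.map String.toList compare) with hpat
  have hpne : pat ≠ [] := hpre
  have hifs : (if 0 < p.1.length then p.1 else []) ++ (if 0 < p.2.length then p.2.reverse else []) =
      p.1 ++ p.2.reverse := by
    by_cases h1 : 0 < p.1.length <;> by_cases h2 : 0 < p.2.length <;>
      simp_all [List.length_pos_iff]
  rw [hifs]
  have hjoin : PySem.Chars.join [] ((p.1 ++ p.2.reverse).map String.toList) =
      PySem.Chars.join [] (p.1.map String.toList) ++
        PySem.Chars.join [] (p.2.reverse.map String.toList) := by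
    simp [join_nil_flat]
  rw [hjoin]
  have hmain := strip_eq_fold pat hpne
    (PySem.Chars.join [] (p.1.map String.toList) ++ PySem.Chars.join [] (p.2.reverse.map String.toList))
    [] ((PySem.Chars.join [] (p.1.map String.toList) ++ PySem.Chars.join [] (p.2.reverse.map String.toList)).length + 1)
    (fun h => hpne (List.infix_nil.mp h)) (by simp)
  simp only [List.nil_append] at hmain
  rw [hmain, List.foldl_append]
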